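-- pv_equiv track=rewrite | github.com/sun-praise/software-factory | app/services/ai_client.py | _collect_review_paths
-- ===== SOURCE A (Python) =====
-- from typing import Any, Mapping
--
-- MAX_CONTEXT_FILES = 8
--
-- def _collect_review_paths(normalized_review: Mapping[str, Any]) -> list[str]:
--     paths: list[str] = []
--     for key in ("must_fix", "should_fix"):
--         items = normalized_review.get(key)
--         if not isinstance(items, list):
--             continue
--         for item in items:
--             if not isinstance(item, Mapping):
--                 continue
--             path = str(item.get("path") or "").strip()
--             if path and path not in paths:
--                 paths.append(path)
--             if len(paths) >= MAX_CONTEXT_FILES: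
--                 return paths
--     return paths
-- ===== SOURCE B (Python) =====
-- from typing import Any, Mapping
--
-- MAX_CONTEXT_FILES = 8
--
-- def _collect_review_paths(normalized_review: Mapping[str, Any]) -> list[str]:
--     # Phase 1: flat extraction (no dedup, no cap)
--     flat: list[str] = []
--     for key in ("must_fix", "should_fix"):
--         items = normalized_review.get(key)
--         if isinstance(items, list):
--             for item in items:
--                 if isinstance(item, Mapping):
--                     flat.append(str(item.get("path") or "").strip())
--     # Phase 2: dedup non-empty paths preserving first occurrence, then cap
--     seen: set[str] = set()
--     out: list[str] = []
--     for p in flat: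
--         if p and p not in seen:
--             seen.add(p)
--             out.append(p)
--     return out[:MAX_CONTEXT_FILES]
-- ===== Notes on version B (the rewrite author's own statement) =====
-- stated objective: simpler
-- what changed: B separates the work into two phases - flat extraction of all stripped path strings in key order, then a single dedup-and-cap pass with a seen set and a final [:8] slice - removing A's interleaved membership scan over the growing result list and its mid-loop early return.
import Mathlib
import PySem

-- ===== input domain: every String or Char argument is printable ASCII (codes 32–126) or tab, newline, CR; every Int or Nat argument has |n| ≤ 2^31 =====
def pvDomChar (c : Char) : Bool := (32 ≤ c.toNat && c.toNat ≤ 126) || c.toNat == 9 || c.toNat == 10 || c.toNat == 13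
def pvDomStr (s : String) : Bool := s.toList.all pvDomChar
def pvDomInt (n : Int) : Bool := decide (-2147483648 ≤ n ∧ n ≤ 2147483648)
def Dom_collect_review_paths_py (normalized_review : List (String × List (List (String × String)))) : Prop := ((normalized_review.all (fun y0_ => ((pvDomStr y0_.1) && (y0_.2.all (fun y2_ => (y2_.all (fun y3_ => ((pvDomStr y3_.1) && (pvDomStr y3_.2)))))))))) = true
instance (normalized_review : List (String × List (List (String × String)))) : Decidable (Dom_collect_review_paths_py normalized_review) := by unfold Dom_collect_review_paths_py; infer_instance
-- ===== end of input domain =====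

-- B splits A's single interleaved loop into flat extraction followed by a dedup-and-cap pass (objective: simpler decomposition).

-- shared sub-expression of both Pythons: str(item.get("path") or "").strip()
-- ('or ""' only maps a missing/empty value to "", which getD "" and strip reproduce exactly)
def stripPath (item : List (String × String)) : String :=
  PySem.Str.strip (PySem.Dict.getD (PySem.Dict.mk item) "path" "")

-- ===== PORT A =====
def collectA_items : List (List (String × String)) → List String → List String × Bool
  | [], paths => (paths, false)
  | item :: rest, paths =>
    let path := stripPath item
    let paths' := if path ≠ "" ∧ path ∉ paths then paths ++ [path] else paths
    if 8 ≤ paths'.length then (paths', true)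
    else collectA_items rest paths'

def collectA_keys (nr : PySem.Dict String (List (List (String × String)))) :
    List String → List String → List String
  | [], paths => paths
  | k :: ks, paths =>
    match nr.get? k with
    | none => collectA_keys nr ks paths
    | some items =>
      let r := collectA_items items paths
      if r.2 then r.1 else collectA_keys nr ks r.1

def collect_review_paths_py (normalized_review : List (String × List (List (String × String)))) : List String :=
  collectA_keys (PySem.Dict.mk normalized_review) ["must_fix", "should_fix"] []

-- ===== PORT B =====
def flatB (nr : PySem.Dict String (List (List (String × String)))) : List String :=
  ["must_fix", "should_fix"].foldl (fun acc k =>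
    match nr.get? k with
    | none => acc
    | some items => acc ++ items.map stripPath) []

def dedupB : List String → PySem.Set String → List String
  | [], _ => []
  | p :: rest, seen =>
    if p ≠ "" ∧ ¬ PySem.Set.contains seen p then p :: dedupB rest (PySem.Set.add seen p)
    else dedupB rest seen

def collect_review_paths_py_alt (normalized_review : List (String × List (List (String × String)))) : List String :=
  (dedupB (flatB (PySem.Dict.mk normalized_review)) PySem.Set.empty).take 8

-- ===== PRECONDITION & SPEC =====
def Spec_collect_review_paths_py (normalized_review : List (String × List (List (String × String)))) (out : List String) : Prop := out = collect_review_paths_py_alt normalized_review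
instance (normalized_review : List (String × List (List (String × String)))) (out : List String) : Decidable (Spec_collect_review_paths_py normalized_review out) := by unfold Spec_collect_review_paths_py; infer_instance

-- ===== CLAIM (what is proved, stated in full; the proofs are below) =====
def Claim_equal_collect_review_paths_py : Prop := ∀ (normalized_review : List (String × List (List (String × String)))), Dom_collect_review_paths_py normalized_review → Spec_collect_review_paths_py normalized_review (collect_review_paths_py normalized_review)

-- ===== LEMMAS AND PROOFS =====

-- reference accumulator: dedup-append of a flat path list into paths (no cap)
def dedupAcc : List String → List String → List String
  | [], paths => paths
  | p :: rest, paths => dedupAcc rest (if p ≠ "" ∧ p ∉ paths then paths ++ [p] else paths)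

theorem dedupAcc_suffix (l : List String) : ∀ paths, ∃ t, dedupAcc l paths = paths ++ t := by
  induction l with
  | nil => exact fun paths => ⟨[], by simp [dedupAcc]⟩
  | cons p rest ih =>
    intro paths
    by_cases h : p ≠ "" ∧ p ∉ paths
    · obtain ⟨t, ht⟩ := ih (paths ++ [p])
      exact ⟨[p] ++ t, by simp [dedupAcc, h, ht]⟩
    · obtain ⟨t, ht⟩ := ih paths
      exact ⟨t, by simp [dedupAcc, h, ht]⟩

theorem dedupAcc_take_of_full (l : List String) (paths : List String) (h : paths.length = 8) :
    (dedupAcc l paths).take 8 = paths := by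
  obtain ⟨t, ht⟩ := dedupAcc_suffix l paths
  rw [ht, ← h]
  exact List.take_left

theorem dedupAcc_append (a b : List String) : ∀ paths, dedupAcc (a ++ b) paths = dedupAcc b (dedupAcc a paths) := by
  induction a with
  | nil => intro paths; simp [dedupAcc]
  | cons p rest ih => intro paths; simp [dedupAcc, ih]

theorem collectA_items_eq (l : List (List (String × String))) :
    ∀ paths, paths.length < 8 →
    collectA_items l paths =
      ((dedupAcc (l.map stripPath) paths).take 8,
        decide (8 ≤ (dedupAcc (l.map stripPath) paths).length)) := by
  induction l with
  | nil =>
    intro paths h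
    simp [collectA_items, dedupAcc, List.take_of_length_le (by omega : paths.length ≤ 8)]
    omega
  | cons item rest ih =>
    intro paths h
    set p := stripPath item with hp
    set paths' := if p ≠ "" ∧ p ∉ paths then paths ++ [p] else paths with hpaths'
    have hlen : paths'.length ≤ paths.length + 1 := by
      rw [hpaths']; split <;> simp
    have hstep : dedupAcc (List.map stripPath (item :: rest)) paths = dedupAcc (rest.map stripPath) paths' := by
      simp [dedupAcc, hp, hpaths']
    by_cases hfull : 8 ≤ paths'.length
    · have h8 : paths'.length = 8 := by omega
      have : collectA_items (item :: rest) paths = (paths', true) := by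
        simp [collectA_items, ← hp, ← hpaths', hfull]
      rw [this, hstep, dedupAcc_take_of_full _ _ h8]
      obtain ⟨t, ht⟩ := dedupAcc_suffix (rest.map stripPath) paths'
      have : 8 ≤ (dedupAcc (rest.map stripPath) paths').length := by
        rw [ht]; simp; omega
      simp [this]
    · have : collectA_items (item :: rest) paths = collectA_items rest paths' := by
        simp [collectA_items, ← hp, ← hpaths', hfull]
      rw [this, hstep, ih paths' (by omega)]

-- flat contribution of one key
def flatKey (nr : PySem.Dict String (List (List (String × String)))) (k : String) : List String :=
  match nr.get? k with
  | none => []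
  | some items => items.map stripPath

def flatKeys (nr : PySem.Dict String (List (List (String × String)))) : List String → List String
  | [] => []
  | k :: ks => flatKey nr k ++ flatKeys nr ks

theorem flatB_foldl (nr : PySem.Dict String (List (List (String × String)))) (ks : List String) :
    ∀ acc, ks.foldl (fun acc k =>
      match nr.get? k with
      | none => acc
      | some items => acc ++ items.map stripPath) acc = acc ++ flatKeys nr ks := by
  induction ks with
  | nil => intro acc; simp [flatKeys]
  | cons k ks ih =>
    intro acc
    simp only [List.foldl_cons, flatKeys, ih]
    cases h : nr.get? k <;> simp [flatKey, h]

theorem collectA_keys_eq (nr : PySem.Dict String (List (List (String × String)))) (ks : List String) :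
    ∀ paths, paths.length < 8 →
    collectA_keys nr ks paths = (dedupAcc (flatKeys nr ks) paths).take 8 := by
  induction ks with
  | nil =>
    intro paths h
    simp [collectA_keys, flatKeys, dedupAcc, List.take_of_length_le (by omega : paths.length ≤ 8)]
  | cons k ks ih =>
    intro paths h
    cases hk : nr.get? k with
    | none => simp [collectA_keys, hk, flatKeys, flatKey, ih paths h]
    | some items =>
      have hrec := collectA_items_eq items paths h
      have hsplit : dedupAcc (flatKeys nr (k :: ks)) paths
          = dedupAcc (flatKeys nr ks) (dedupAcc (items.map stripPath) paths) := by
        simp [flatKeys, flatKey, hk, dedupAcc_append]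
      by_cases hfull : 8 ≤ (dedupAcc (items.map stripPath) paths).length
      · have : collectA_keys nr (k :: ks) paths = (dedupAcc (items.map stripPath) paths).take 8 := by
          simp [collectA_keys, hk, hrec, hfull]
        rw [this, hsplit]
        have h8 : ((dedupAcc (items.map stripPath) paths).take 8).length = 8 := by
          simp; omega
        obtain ⟨t, ht⟩ := dedupAcc_suffix (flatKeys nr ks) (dedupAcc (items.map stripPath) paths)
        obtain ⟨u, hu⟩ : ∃ u, dedupAcc (items.map stripPath) paths
            = (dedupAcc (items.map stripPath) paths).take 8 ++ u :=
          ⟨(dedupAcc (items.map stripPath) paths).drop 8, (List.take_append_drop _ _).symm⟩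
        rw [ht, hu]
        simp [h8]
      · have hlt : (dedupAcc (items.map stripPath) paths).length < 8 := by omega
        have htake : (dedupAcc (items.map stripPath) paths).take 8 = dedupAcc (items.map stripPath) paths :=
          List.take_of_length_le (by omega)
        have : collectA_keys nr (k :: ks) paths
            = collectA_keys nr ks (dedupAcc (items.map stripPath) paths) := by
          simp [collectA_keys, hk, hrec, hfull, htake]
        rw [this, hsplit, ih _ hlt]

theorem dedupB_eq (l : List String) :
    ∀ (seen : PySem.Set String) (acc : List String),
    (∀ q, q ∈ seen ↔ q ∈ acc) →
    acc ++ dedupB l seen = dedupAcc l acc := by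
  induction l with
  | nil => intro seen acc _; simp [dedupB, dedupAcc]
  | cons p rest ih =>
    intro seen acc hseen
    have hmem : (p ≠ "" ∧ ¬ PySem.Set.contains seen p) ↔ (p ≠ "" ∧ p ∉ acc) := by
      simp [hseen p]
    by_cases hc : p ≠ "" ∧ p ∉ acc
    · have hc' : p ≠ "" ∧ ¬ PySem.Set.contains seen p = true := hmem.mpr hc
      have hadd : ∀ q, q ∈ PySem.Set.add seen p ↔ q ∈ acc ++ [p] := by
        intro q
        simp [PySem.Set.mem_add, hseen q]
      calc acc ++ dedupB (p :: rest) seen = (acc ++ [p]) ++ dedupB rest (PySem.Set.add seen p) := by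
            rw [dedupB, if_pos hc']; simp
        _ = dedupAcc rest (acc ++ [p]) := ih _ _ hadd
        _ = dedupAcc (p :: rest) acc := by simp [dedupAcc, hc]
    · have hc' : ¬ (p ≠ "" ∧ ¬ PySem.Set.contains seen p = true) := fun h => hc (hmem.mp h)
      simp only [dedupAcc, dedupB, if_neg hc', if_neg hc]
      exact ih _ _ hseen

-- ===== VERDICT (by name: the statement is the Claim_ definition above) =====
theorem collect_review_paths_py_spec : Claim_equal_collect_review_paths_py := by
  intro nr _
  unfold Spec_collect_review_paths_py collect_review_paths_py collect_review_paths_py_alt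
  have hflat : flatB (PySem.Dict.mk nr) = flatKeys (PySem.Dict.mk nr) ["must_fix", "should_fix"] := by
    simpa using flatB_foldl (PySem.Dict.mk nr) ["must_fix", "should_fix"] []
  have hded : ([] : List String) ++ dedupB (flatB (PySem.Dict.mk nr)) PySem.Set.empty
      = dedupAcc (flatB (PySem.Dict.mk nr)) [] := by
    apply dedupB_eq
    intro q; simp [PySem.Set.empty]
  rw [collectA_keys_eq _ _ [] (by simp), ← hflat, ← hded]
  simp
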